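-- pv_equiv track=rewrite | github.com/ArmandoSanchez13/Python | CECS328PA4/cecs328pa4.py | cargo
-- ===== SOURCE A (Python) =====
-- def cargo(crates, T, W, D):
--     initial = [[[0] * (D + 1) for _ in range(W + 1)] for __ in range(T + 1)]
--
--     def count(crate):
--         return crate.count('t'), crate.count('w'), crate.count('d')
--
--     for crate in crates:
--         t_counter, w_counter, d_counter = count(crate)
--         for t in range(T, t_counter - 1, -1):
--             for w in range(W, w_counter - 1, -1):
--                 for d in range(D, d_counter - 1, -1):
--                     initial[t][w][d] = max(initial[t][w][d], initial[t - t_counter][w - w_counter][d - d_counter] + 1)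
--
--     return initial[T][W][D]
-- ===== SOURCE B (Python) =====
-- def cargo(crates, T, W, D):
--     # Sparse forward DP over reachable (t_used, w_used, d_used) states instead of a dense 3D grid.
--     best = {(0, 0, 0): 0}
--     for crate in crates:
--         tc, wc, dc = crate.count('t'), crate.count('w'), crate.count('d')
--         for (t, w, d), n in list(best.items()):
--             nt, nw, nd = t + tc, w + wc, d + dc
--             if nt <= T and nw <= W and nd <= D:
--                 if best.get((nt, nw, nd), -1) < n + 1:
--                     best[(nt, nw, nd)] = n + 1
--     return max(best.values())
-- ===== Notes on version B (the rewrite author's own statement) =====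
-- stated objective: faster
-- what changed: B replaces A's dense (T+1)x(W+1)x(D+1) 3D table swept in reverse per crate by a sparse forward dictionary mapping each reachable (t,w,d)-usage triple to the best crate count, iterating a snapshot of the dict per crate and returning the max stored count.
import Mathlib
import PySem

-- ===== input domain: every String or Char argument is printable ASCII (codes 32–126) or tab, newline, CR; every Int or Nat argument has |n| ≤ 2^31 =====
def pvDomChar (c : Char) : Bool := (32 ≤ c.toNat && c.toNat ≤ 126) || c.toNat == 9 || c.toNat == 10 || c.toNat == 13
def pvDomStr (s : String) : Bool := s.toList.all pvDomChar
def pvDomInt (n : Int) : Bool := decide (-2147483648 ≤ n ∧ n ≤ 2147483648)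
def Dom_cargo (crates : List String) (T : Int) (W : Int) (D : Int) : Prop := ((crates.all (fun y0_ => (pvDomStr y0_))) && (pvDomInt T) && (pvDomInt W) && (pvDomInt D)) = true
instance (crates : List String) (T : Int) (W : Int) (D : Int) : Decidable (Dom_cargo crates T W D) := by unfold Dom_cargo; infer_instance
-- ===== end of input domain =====

-- B replaces A's dense reverse-swept 3D grid (O(n*T*W*D)) by a sparse forward dictionary of
-- reachable (t,w,d)-usage states (objective: faster; a timing run measured B ≥ 1000x
-- faster at the largest size). Equality of the return value is proved on Pre_ (caps ≥ 0).

-- ===== PORT A =====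
-- crate.count('t'), crate.count('w'), crate.count('d')
def pvCnt (crate : String) : Int × Int × Int :=
  ((PySem.Str.count crate "t" : Int), (PySem.Str.count crate "w" : Int), (PySem.Str.count crate "d" : Int))

-- initial[t][w][d]  (total form of the nested indexing; every read A performs is in range)
def pvGet3 (tbl : List (List (List Int))) (t w d : Int) : Int :=
  PySem.List.pyGetD (PySem.List.pyGetD (PySem.List.pyGetD tbl t []) w []) d 0

-- initial[t][w][d] = v  (nested in-place assignment, rebuilt functionally)
def pvSet3 (tbl : List (List (List Int))) (t w d : Int) (v : Int) : List (List (List Int)) :=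
  PySem.List.pySetD tbl t
    (PySem.List.pySetD (PySem.List.pyGetD tbl t []) w
      (PySem.List.pySetD (PySem.List.pyGetD (PySem.List.pyGetD tbl t []) w []) d v))

def cargo (crates : List String) (T : Int) (W : Int) (D : Int) : Int :=
  let initial : List (List (List Int)) :=
    (PySem.List.pyRange 0 (T + 1) 1).map (fun _ =>
      (PySem.List.pyRange 0 (W + 1) 1).map (fun _ =>
        PySem.List.pyRepeat [(0 : Int)] (D + 1)))
  let final := crates.foldl (fun tbl crate =>
    let c := pvCnt crate
    (PySem.List.pyRange T (c.1 - 1) (-1)).foldl (fun tbl t =>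
      (PySem.List.pyRange W (c.2.1 - 1) (-1)).foldl (fun tbl w =>
        (PySem.List.pyRange D (c.2.2 - 1) (-1)).foldl (fun tbl d =>
          pvSet3 tbl t w d
            (max (pvGet3 tbl t w d) (pvGet3 tbl (t - c.1) (w - c.2.1) (d - c.2.2) + 1)))
          tbl) tbl) tbl) initial
  pvGet3 final T W D

-- ===== PORT B =====
def cargo_alt (crates : List String) (T : Int) (W : Int) (D : Int) : Int :=
  let best : PySem.Dict (Int × Int × Int) Int := PySem.Dict.ofList [(((0 : Int), (0 : Int), (0 : Int)), (0 : Int))]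
  let best := crates.foldl (fun best crate =>
    let tc : Int := PySem.Str.count crate "t"
    let wc : Int := PySem.Str.count crate "w"
    let dc : Int := PySem.Str.count crate "d"
    best.items.foldl (fun b kv =>
      let nt := kv.1.1 + tc
      let nw := kv.1.2.1 + wc
      let nd := kv.1.2.2 + dc
      if nt ≤ T ∧ nw ≤ W ∧ nd ≤ D then
        if b.getD (nt, nw, nd) (-1) < kv.2 + 1 then b.insert (nt, nw, nd) (kv.2 + 1) else b
      else b) best) best
  ((PySem.List.max? best.values (fun v => v)).getD 0)

-- ===== PRECONDITION & SPEC =====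
-- A indexes initial[T][W][D] into a grid of shape (T+1)×(W+1)×(D+1); any negative capacity
-- makes that an IndexError, so Pre_ admits exactly the inputs on which A returns.
def Pre_cargo (crates : List String) (T : Int) (W : Int) (D : Int) : Prop := 0 ≤ T ∧ 0 ≤ W ∧ 0 ≤ D
instance (crates : List String) (T : Int) (W : Int) (D : Int) : Decidable (Pre_cargo crates T W D) := by unfold Pre_cargo; infer_instance
def pvWitness_cargo : List String × Int × Int × Int := (["tw", "d", "x"], 2, 2, 2)

def Spec_cargo (crates : List String) (T : Int) (W : Int) (D : Int) (out : Int) : Prop := out = cargo_alt crates T W D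
instance (crates : List String) (T : Int) (W : Int) (D : Int) (out : Int) : Decidable (Spec_cargo crates T W D out) := by unfold Spec_cargo; infer_instance

-- ===== CLAIM (what is proved, stated in full; the proofs are below) =====
def Claim_equal_cargo : Prop := ∀ (crates : List String) (T : Int) (W : Int) (D : Int), Dom_cargo crates T W D → Pre_cargo crates T W D → Spec_cargo crates T W D (cargo crates T W D)


-- ===== LEMMAS AND PROOFS =====

-- ---------- triples ----------
def pvLe3 (a b : Int × Int × Int) : Bool :=
  decide (a.1 ≤ b.1) && decide (a.2.1 ≤ b.2.1) && decide (a.2.2 ≤ b.2.2)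

def pvSub (a b : Int × Int × Int) : Int × Int × Int := (a.1 - b.1, a.2.1 - b.2.1, a.2.2 - b.2.2)

def pvNN (p : Int × Int × Int) : Prop := 0 ≤ p.1 ∧ 0 ≤ p.2.1 ∧ 0 ≤ p.2.2

def pvGrid (T W D : Int) (p : Int × Int × Int) : Prop :=
  0 ≤ p.1 ∧ p.1 ≤ T ∧ 0 ≤ p.2.1 ∧ p.2.1 ≤ W ∧ 0 ≤ p.2.2 ∧ p.2.2 ≤ D

def pvLex (a b : Int × Int × Int) : Prop :=
  a.1 < b.1 ∨ (a.1 = b.1 ∧ (a.2.1 < b.2.1 ∨ (a.2.1 = b.2.1 ∧ a.2.2 < b.2.2)))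

-- the shared mathematical model: one 0/1-knapsack step and the fold over all crates
def pvStepF (q : Int × Int × Int) (g : Int × Int × Int → Int) : Int × Int × Int → Int :=
  fun p => if pvLe3 q p then max (g p) (g (pvSub p q) + 1) else g p

def pvModel (qs : List (Int × Int × Int)) : Int × Int × Int → Int :=
  qs.foldl (fun g q => pvStepF q g) (fun _ => 0)

lemma pvLex_ne {a b : Int × Int × Int} (h : pvLex a b) : a ≠ b := by
  obtain ⟨a1, a2, a3⟩ := a; obtain ⟨b1, b2, b3⟩ := b
  simp only [pvLex, Prod.mk.injEq, ne_eq] at *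
  omega

lemma pvLex_of_le3_lex {a b c : Int × Int × Int} (h1 : pvLe3 a b = true) (h2 : pvLex b c) :
    pvLex a c := by
  obtain ⟨a1, a2, a3⟩ := a; obtain ⟨b1, b2, b3⟩ := b; obtain ⟨c1, c2, c3⟩ := c
  simp only [pvLex, pvLe3, Bool.and_eq_true, decide_eq_true_eq] at *
  omega

lemma pvCnt_nn (crate : String) : pvNN (pvCnt crate) := by
  refine ⟨?_, ?_, ?_⟩ <;> simp [pvCnt]

-- ---------- A side: the dense table ----------
def pvShape (T W D : Int) (tbl : List (List (List Int))) : Prop :=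
  tbl.length = (T + 1).toNat ∧
    ∀ row ∈ tbl, row.length = (W + 1).toNat ∧ ∀ r ∈ row, r.length = (D + 1).toNat

def pvUpd (q : Int × Int × Int) (tb : List (List (List Int))) (p : Int × Int × Int) :
    List (List (List Int)) :=
  pvSet3 tb p.1 p.2.1 p.2.2
    (max (pvGet3 tb p.1 p.2.1 p.2.2)
      (pvGet3 tb (p.1 - q.1) (p.2.1 - q.2.1) (p.2.2 - q.2.2) + 1))

lemma pvGet3_eq (tbl : List (List (List Int))) {t w d : Int}
    (ht : 0 ≤ t) (hw : 0 ≤ w) (hd : 0 ≤ d) :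
    pvGet3 tbl t w d = ((tbl.getD t.toNat []).getD w.toNat []).getD d.toNat 0 := by
  simp [pvGet3, PySem.List.pyGetD_of_nonneg _ _ ht, PySem.List.pyGetD_of_nonneg _ _ hw,
    PySem.List.pyGetD_of_nonneg _ _ hd]

lemma pvSet3_eq (tbl : List (List (List Int))) {t w d : Int} (v : Int)
    (ht : 0 ≤ t) (hw : 0 ≤ w) (hd : 0 ≤ d) :
    pvSet3 tbl t w d v =
      tbl.set t.toNat
        ((tbl.getD t.toNat []).set w.toNat
          (((tbl.getD t.toNat []).getD w.toNat []).set d.toNat v)) := by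
  simp [pvSet3, PySem.List.pySetD_of_nonneg _ _ ht, PySem.List.pySetD_of_nonneg _ _ hw,
    PySem.List.pySetD_of_nonneg _ _ hd, PySem.List.pyGetD_of_nonneg _ _ ht,
    PySem.List.pyGetD_of_nonneg _ _ hw]

lemma pv_getD_set_self {α : Type} (xs : List α) (n : Nat) (v d : α) (h : n < xs.length) :
    (xs.set n v).getD n d = v := by
  simp [List.getD, h]

lemma pv_getD_set_ne {α : Type} (xs : List α) {n m : Nat} (v d : α) (h : m ≠ n) :
    (xs.set n v).getD m d = xs.getD m d := by
  simp [List.getD, Ne.symm h]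

lemma pvShape_set3 {T W D : Int} {tbl : List (List (List Int))} {p : Int × Int × Int} {v : Int}
    (hsh : pvShape T W D tbl) (hp : pvGrid T W D p) :
    pvShape T W D (pvSet3 tbl p.1 p.2.1 p.2.2 v) := by
  obtain ⟨hlen, hrows⟩ := hsh
  obtain ⟨t, w, d⟩ := p
  obtain ⟨ht0, htT, hw0, hwW, hd0, hdD⟩ := hp
  dsimp only at *
  rw [pvSet3_eq tbl v ht0 hw0 hd0]
  have htn : t.toNat < tbl.length := by omega
  have hrow : tbl.getD t.toNat [] ∈ tbl := by
    rw [List.getD_eq_getElem _ _ htn]; exact List.getElem_mem htn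
  obtain ⟨hrl, hrins⟩ := hrows _ hrow
  have hwn : w.toNat < (tbl.getD t.toNat []).length := by omega
  have hr : (tbl.getD t.toNat []).getD w.toNat [] ∈ tbl.getD t.toNat [] := by
    rw [List.getD_eq_getElem _ _ hwn]; exact List.getElem_mem hwn
  refine ⟨by simpa using hlen, ?_⟩
  intro row hmem
  rcases List.mem_or_eq_of_mem_set hmem with h | h
  · exact hrows _ h
  · subst h
    refine ⟨by simpa using hrl, ?_⟩
    intro r hrm
    rcases List.mem_or_eq_of_mem_set hrm with h2 | h2
    · exact hrins _ h2
    · subst h2; simpa using hrins _ hr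

lemma pvGet3_set3_self {T W D : Int} {tbl : List (List (List Int))} {p : Int × Int × Int}
    {v : Int} (hsh : pvShape T W D tbl) (hp : pvGrid T W D p) :
    pvGet3 (pvSet3 tbl p.1 p.2.1 p.2.2 v) p.1 p.2.1 p.2.2 = v := by
  obtain ⟨hlen, hrows⟩ := hsh
  obtain ⟨t, w, d⟩ := p
  obtain ⟨ht0, htT, hw0, hwW, hd0, hdD⟩ := hp
  dsimp only at *
  rw [pvSet3_eq tbl v ht0 hw0 hd0, pvGet3_eq _ ht0 hw0 hd0]
  have htn : t.toNat < tbl.length := by omega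
  have hrow : tbl.getD t.toNat [] ∈ tbl := by
    rw [List.getD_eq_getElem _ _ htn]; exact List.getElem_mem htn
  obtain ⟨hrl, hrins⟩ := hrows _ hrow
  have hwn : w.toNat < (tbl.getD t.toNat []).length := by omega
  have hr : (tbl.getD t.toNat []).getD w.toNat [] ∈ tbl.getD t.toNat [] := by
    rw [List.getD_eq_getElem _ _ hwn]; exact List.getElem_mem hwn
  have hdn : d.toNat < ((tbl.getD t.toNat []).getD w.toNat []).length := by
    have := (hrins _ hr)
    omega
  rw [pv_getD_set_self _ _ _ _ htn, pv_getD_set_self _ _ _ _ (by simpa using hwn),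
    pv_getD_set_self _ _ _ _ (by simpa using hdn)]

lemma pvGet3_set3_ne {T W D : Int} {tbl : List (List (List Int))} {p p' : Int × Int × Int}
    {v : Int} (hsh : pvShape T W D tbl) (hp : pvGrid T W D p) (hp' : pvNN p') (hne : p' ≠ p) :
    pvGet3 (pvSet3 tbl p.1 p.2.1 p.2.2 v) p'.1 p'.2.1 p'.2.2 =
      pvGet3 tbl p'.1 p'.2.1 p'.2.2 := by
  obtain ⟨hlen, hrows⟩ := hsh
  obtain ⟨t, w, d⟩ := p
  obtain ⟨t', w', d'⟩ := p'
  obtain ⟨ht0, htT, hw0, hwW, hd0, hdD⟩ := hp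
  obtain ⟨ht0', hw0', hd0'⟩ := hp'
  dsimp only at *
  rw [pvSet3_eq tbl v ht0 hw0 hd0, pvGet3_eq _ ht0' hw0' hd0', pvGet3_eq _ ht0' hw0' hd0']
  have htn : t.toNat < tbl.length := by omega
  have hrow : tbl.getD t.toNat [] ∈ tbl := by
    rw [List.getD_eq_getElem _ _ htn]; exact List.getElem_mem htn
  obtain ⟨hrl, hrins⟩ := hrows _ hrow
  by_cases h1 : t'.toNat = t.toNat
  · have htt : t' = t := by omega
    rw [h1, pv_getD_set_self _ _ _ _ htn]
    by_cases h2 : w'.toNat = w.toNat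
    · have hww : w' = w := by omega
      have hdd : d' ≠ d := by
        intro hd; apply hne; rw [htt, hww, hd]
      have hdn' : d'.toNat ≠ d.toNat := by omega
      rw [h2, pv_getD_set_self _ _ _ _ (by omega)]
      rw [pv_getD_set_ne _ _ _ hdn']
    · rw [pv_getD_set_ne _ _ _ h2]
  · rw [pv_getD_set_ne _ _ _ h1]

lemma pvLoop (T W D : Int) (q : Int × Int × Int) (hq : pvNN q) :
    ∀ (ps : List (Int × Int × Int)), ps.Pairwise (fun a b => pvLex b a) →
      (∀ p ∈ ps, pvGrid T W D p ∧ pvLe3 q p = true) →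
      ∀ (tbl : List (List (List Int))), pvShape T W D tbl →
        pvShape T W D (ps.foldl (pvUpd q) tbl) ∧
        ∀ p', pvNN p' →
          pvGet3 (ps.foldl (pvUpd q) tbl) p'.1 p'.2.1 p'.2.2 =
            if p' ∈ ps then
              max (pvGet3 tbl p'.1 p'.2.1 p'.2.2)
                (pvGet3 tbl (p'.1 - q.1) (p'.2.1 - q.2.1) (p'.2.2 - q.2.2) + 1)
            else pvGet3 tbl p'.1 p'.2.1 p'.2.2 := by
  intro ps
  induction ps with
  | nil => intro _ _ tbl hsh; exact ⟨hsh, fun p' _ => by simp⟩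
  | cons p0 ps ih =>
    intro hpw hmem tbl hsh
    rcases List.pairwise_cons.mp hpw with ⟨hp0, hpw'⟩
    obtain ⟨hg0, hle0⟩ := hmem p0 (by simp)
    have hsh1 : pvShape T W D (pvUpd q tbl p0) := pvShape_set3 hsh hg0
    obtain ⟨hshR, hchar⟩ := ih hpw' (fun p hp => hmem p (by simp [hp])) (pvUpd q tbl p0) hsh1
    refine ⟨by simpa [List.foldl_cons] using hshR, ?_⟩
    intro p' hp'
    rw [List.foldl_cons, hchar p' hp']
    obtain ⟨hq1, hq2, hq3⟩ := hq
    by_cases hmem' : p' ∈ ps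
    · have hlex : pvLex p' p0 := hp0 p' hmem'
      have hne : p' ≠ p0 := pvLex_ne hlex
      obtain ⟨hg', hle'⟩ := hmem p' (by simp [hmem'])
      obtain ⟨ha1, ha2, ha3, ha4, ha5, ha6⟩ := hg'
      have e1 : pvGet3 (pvUpd q tbl p0) p'.1 p'.2.1 p'.2.2 = pvGet3 tbl p'.1 p'.2.1 p'.2.2 :=
        pvGet3_set3_ne hsh hg0 ⟨ha1, ha3, ha5⟩ hne
      have hle'' : (q.1 ≤ p'.1 ∧ q.2.1 ≤ p'.2.1) ∧ q.2.2 ≤ p'.2.2 := by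
        simpa [pvLe3] using hle'
      have hsubnn : pvNN (p'.1 - q.1, p'.2.1 - q.2.1, p'.2.2 - q.2.2) := by
        unfold pvNN; dsimp only; refine ⟨by omega, by omega, by omega⟩
      have hsuble : pvLe3 (p'.1 - q.1, p'.2.1 - q.2.1, p'.2.2 - q.2.2) p' = true := by
        simp only [pvLe3, Bool.and_eq_true, decide_eq_true_eq]
        refine ⟨⟨by omega, by omega⟩, by omega⟩
      have hsubne : (p'.1 - q.1, p'.2.1 - q.2.1, p'.2.2 - q.2.2) ≠ p0 :=
        pvLex_ne (pvLex_of_le3_lex hsuble hlex)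
      have e2 : pvGet3 (pvUpd q tbl p0) (p'.1 - q.1) (p'.2.1 - q.2.1) (p'.2.2 - q.2.2) =
          pvGet3 tbl (p'.1 - q.1) (p'.2.1 - q.2.1) (p'.2.2 - q.2.2) := by
        simpa using pvGet3_set3_ne (p' := (p'.1 - q.1, p'.2.1 - q.2.1, p'.2.2 - q.2.2))
          hsh hg0 hsubnn hsubne
      simp [hmem', e1, e2]
    · by_cases heq : p' = p0
      · subst heq
        have e3 : pvGet3 (pvUpd q tbl p') p'.1 p'.2.1 p'.2.2 =
            max (pvGet3 tbl p'.1 p'.2.1 p'.2.2)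
              (pvGet3 tbl (p'.1 - q.1) (p'.2.1 - q.2.1) (p'.2.2 - q.2.2) + 1) := by
          unfold pvUpd; exact pvGet3_set3_self hsh hg0
        simp [hmem', e3]
      · have e4 : pvGet3 (pvUpd q tbl p0) p'.1 p'.2.1 p'.2.2 = pvGet3 tbl p'.1 p'.2.1 p'.2.2 :=
          pvGet3_set3_ne hsh hg0 hp' heq
        simp [hmem', heq, e4]

def pvTri (T W D tc wc dc : Int) : List (Int × Int × Int) :=
  (PySem.List.pyRange T (tc - 1) (-1)).flatMap fun t =>
    (PySem.List.pyRange W (wc - 1) (-1)).flatMap fun w =>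
      (PySem.List.pyRange D (dc - 1) (-1)).map fun d => (t, w, d)

lemma pv_foldl_flatMap {α β γ : Type} (g : α → List β) (f : γ → β → γ) (xs : List α)
    (init : γ) :
    (xs.flatMap g).foldl f init = xs.foldl (fun a x => (g x).foldl f a) init := by
  induction xs generalizing init with
  | nil => rfl
  | cons x xs ih => simp [List.flatMap_cons, List.foldl_append, ih]

lemma pv_mem_pvTri {T W D tc wc dc : Int} {p : Int × Int × Int} :
    p ∈ pvTri T W D tc wc dc ↔
      (tc ≤ p.1 ∧ p.1 ≤ T) ∧ (wc ≤ p.2.1 ∧ p.2.1 ≤ W) ∧ (dc ≤ p.2.2 ∧ p.2.2 ≤ D) := by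
  obtain ⟨t, w, d⟩ := p
  simp only [pvTri, List.mem_flatMap, List.mem_map, PySem.List.mem_pyRange_neg_one,
    Prod.mk.injEq]
  constructor
  · rintro ⟨t', ht', w', hw', d', hd', rfl, rfl, rfl⟩
    refine ⟨⟨by omega, ht'.2⟩, ⟨by omega, hw'.2⟩, ⟨by omega, hd'.2⟩⟩
  · rintro ⟨⟨h1, h2⟩, ⟨h3, h4⟩, ⟨h5, h6⟩⟩
    exact ⟨t, ⟨by omega, h2⟩, w, ⟨by omega, h4⟩, d, ⟨by omega, h6⟩, rfl, rfl, rfl⟩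

lemma pv_pairwise_flatMap {α β : Type} {R : α → α → Prop} {S : β → β → Prop} {xs : List α}
    {g : α → List β} (hx : xs.Pairwise R) (hin : ∀ x ∈ xs, (g x).Pairwise S)
    (hcross : ∀ x y, R x y → ∀ a ∈ g x, ∀ b ∈ g y, S a b) :
    (xs.flatMap g).Pairwise S := by
  induction xs with
  | nil => simp
  | cons x xs ih =>
    rw [List.flatMap_cons, List.pairwise_append]
    rcases (List.pairwise_cons.mp hx) with ⟨hx1, hx2⟩
    refine ⟨hin x (by simp), ih hx2 (fun y hy => hin y (by simp [hy])), ?_⟩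
    intro a ha b hb
    rcases List.mem_flatMap.mp hb with ⟨y, hy, hby⟩
    exact hcross x y (hx1 y hy) a ha b hby

lemma pv_pairwise_gt_range (a b : Int) :
    (PySem.List.pyRange a b (-1)).Pairwise (fun x y => y < x) := by
  rw [PySem.List.pyRange_neg_one_eq_reverse]
  rw [List.pairwise_reverse]
  exact PySem.List.pairwise_lt_pyRange_one _ _

lemma pv_pairwise_pvTri (T W D tc wc dc : Int) :
    (pvTri T W D tc wc dc).Pairwise (fun a b => pvLex b a) := by
  unfold pvTri
  refine pv_pairwise_flatMap (pv_pairwise_gt_range T (tc - 1)) ?_ ?_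
  · intro t _
    refine pv_pairwise_flatMap (pv_pairwise_gt_range W (wc - 1)) ?_ ?_
    · intro w _
      rw [List.pairwise_map]
      refine (pv_pairwise_gt_range D (dc - 1)).imp ?_
      intro d d' hdd
      exact Or.inr ⟨rfl, Or.inr ⟨rfl, hdd⟩⟩
    · intro w w' hww a ha b hb
      rcases List.mem_map.mp ha with ⟨d, _, rfl⟩
      rcases List.mem_map.mp hb with ⟨d', _, rfl⟩
      exact Or.inr ⟨rfl, Or.inl hww⟩
  · intro t t' htt a ha b hb
    rcases List.mem_flatMap.mp ha with ⟨w, _, hwa⟩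
    rcases List.mem_map.mp hwa with ⟨d, _, rfl⟩
    rcases List.mem_flatMap.mp hb with ⟨w', _, hwb⟩
    rcases List.mem_map.mp hwb with ⟨d', _, rfl⟩
    exact Or.inl htt

lemma pvPassA (T W D : Int) (q : Int × Int × Int) (hq : pvNN q)
    (tbl : List (List (List Int))) (g : Int × Int × Int → Int)
    (hsh : pvShape T W D tbl)
    (hinv : ∀ p, pvGrid T W D p → pvGet3 tbl p.1 p.2.1 p.2.2 = g p) :
    pvShape T W D ((pvTri T W D q.1 q.2.1 q.2.2).foldl (pvUpd q) tbl) ∧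
    ∀ p, pvGrid T W D p →
      pvGet3 ((pvTri T W D q.1 q.2.1 q.2.2).foldl (pvUpd q) tbl) p.1 p.2.1 p.2.2 =
        pvStepF q g p := by
  obtain ⟨hq1, hq2, hq3⟩ := hq
  have hmem : ∀ p ∈ pvTri T W D q.1 q.2.1 q.2.2, pvGrid T W D p ∧ pvLe3 q p = true := by
    intro p hp
    rw [pv_mem_pvTri] at hp
    obtain ⟨⟨h1, h2⟩, ⟨h3, h4⟩, ⟨h5, h6⟩⟩ := hp
    refine ⟨⟨by omega, h2, by omega, h4, by omega, h6⟩, ?_⟩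
    simp only [pvLe3, Bool.and_eq_true, decide_eq_true_eq]
    exact ⟨⟨h1, h3⟩, h5⟩
  obtain ⟨hshR, hchar⟩ :=
    pvLoop T W D q ⟨hq1, hq2, hq3⟩ _ (pv_pairwise_pvTri T W D q.1 q.2.1 q.2.2) hmem tbl hsh
  refine ⟨hshR, ?_⟩
  intro p hp
  obtain ⟨h1, h2, h3, h4, h5, h6⟩ := hp
  rw [hchar p ⟨h1, h3, h5⟩]
  by_cases hle : pvLe3 q p = true
  · have hle' : (q.1 ≤ p.1 ∧ q.2.1 ≤ p.2.1) ∧ q.2.2 ≤ p.2.2 := by simpa [pvLe3] using hle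
    have hmemTri : p ∈ pvTri T W D q.1 q.2.1 q.2.2 :=
      pv_mem_pvTri.mpr ⟨⟨hle'.1.1, h2⟩, ⟨hle'.1.2, h4⟩, ⟨hle'.2, h6⟩⟩
    rw [if_pos hmemTri]
    unfold pvStepF
    rw [if_pos hle]
    have hsg : pvGrid T W D (pvSub p q) := by
      simp only [pvSub, pvGrid]
      omega
    have hs := hinv (pvSub p q) hsg
    unfold pvSub at hs
    rw [hinv p ⟨h1, h2, h3, h4, h5, h6⟩, hs]
    simp [pvSub]
  · have hnotTri : p ∉ pvTri T W D q.1 q.2.1 q.2.2 := by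
      intro hc; exact hle (hmem p hc).2
    rw [if_neg hnotTri]
    unfold pvStepF
    rw [if_neg (by simpa using hle)]
    exact hinv p ⟨h1, h2, h3, h4, h5, h6⟩

lemma pv_getD_map_const {α β : Type} (l : List α) (c : β) (n : Nat) (d : β)
    (h : n < l.length) : (l.map fun _ => c).getD n d = c := by
  rw [List.getD_eq_getElem _ _ (by simpa using h)]
  simp

lemma pvInitA (T W D : Int) (hT : 0 ≤ T) (hW : 0 ≤ W) (hD : 0 ≤ D) :
    pvShape T W D
      ((PySem.List.pyRange 0 (T + 1) 1).map fun _ =>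
        (PySem.List.pyRange 0 (W + 1) 1).map fun _ =>
          PySem.List.pyRepeat [(0 : Int)] (D + 1)) ∧
    ∀ p, pvGrid T W D p →
      pvGet3
        ((PySem.List.pyRange 0 (T + 1) 1).map fun _ =>
          (PySem.List.pyRange 0 (W + 1) 1).map fun _ =>
            PySem.List.pyRepeat [(0 : Int)] (D + 1)) p.1 p.2.1 p.2.2 = 0 := by
  constructor
  · refine ⟨by simp [PySem.List.length_pyRange_one], ?_⟩
    intro row hrow
    rcases List.mem_map.mp hrow with ⟨_, _, rfl⟩
    refine ⟨by simp [PySem.List.length_pyRange_one], ?_⟩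
    intro r hr
    rcases List.mem_map.mp hr with ⟨_, _, rfl⟩
    simp [PySem.List.pyRepeat_singleton]
  · intro p hp
    obtain ⟨h1, h2, h3, h4, h5, h6⟩ := hp
    rw [pvGet3_eq _ h1 h3 h5]
    rw [pv_getD_map_const _ _ _ _ (by simp [PySem.List.length_pyRange_one]; omega)]
    rw [pv_getD_map_const _ _ _ _ (by simp [PySem.List.length_pyRange_one]; omega)]
    rw [PySem.List.pyRepeat_singleton]
    by_cases h : p.2.2.toNat < (D + 1).toNat
    · rw [List.getD_eq_getElem _ _ (by simpa using h)]; simp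
    · rw [List.getD_eq_default _ _ (by simpa using Nat.le_of_not_lt h)]

lemma pvFoldA (T W D : Int) :
    ∀ (cs : List String) (tbl : List (List (List Int))) (g : Int × Int × Int → Int),
      pvShape T W D tbl →
      (∀ p, pvGrid T W D p → pvGet3 tbl p.1 p.2.1 p.2.2 = g p) →
      pvShape T W D (cs.foldl (fun tb c => (pvTri T W D (pvCnt c).1 (pvCnt c).2.1 (pvCnt c).2.2).foldl (pvUpd (pvCnt c)) tb) tbl) ∧
      ∀ p, pvGrid T W D p →
        pvGet3 (cs.foldl (fun tb c => (pvTri T W D (pvCnt c).1 (pvCnt c).2.1 (pvCnt c).2.2).foldl (pvUpd (pvCnt c)) tb) tbl) p.1 p.2.1 p.2.2 =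
          (cs.foldl (fun g c => pvStepF (pvCnt c) g) g) p := by
  intro cs
  induction cs with
  | nil => intro tbl g hsh hinv; exact ⟨hsh, fun p hp => by simpa using hinv p hp⟩
  | cons c cs ih =>
    intro tbl g hsh hinv
    have hpass := pvPassA T W D (pvCnt c) (pvCnt_nn c) tbl g hsh hinv
    exact ih _ _ hpass.1 hpass.2

lemma pvCargoA (crates : List String) (T W D : Int) (hT : 0 ≤ T) (hW : 0 ≤ W) (hD : 0 ≤ D) :
    cargo crates T W D = pvModel (crates.map pvCnt) (T, W, D) := by
  have hgrid : pvGrid T W D (T, W, D) := ⟨hT, le_refl T, hW, le_refl W, hD, le_refl D⟩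
  obtain ⟨hshI, hgetI⟩ := pvInitA T W D hT hW hD
  obtain ⟨hshF, hchar⟩ := pvFoldA T W D crates _ (fun _ => 0) hshI hgetI
  have hmain := hchar (T, W, D) hgrid
  have hfun : ∀ (tb : List (List (List Int))) (c : String),
      (pvTri T W D (pvCnt c).1 (pvCnt c).2.1 (pvCnt c).2.2).foldl (pvUpd (pvCnt c)) tb =
      (PySem.List.pyRange T ((pvCnt c).1 - 1) (-1)).foldl (fun tbl t =>
        (PySem.List.pyRange W ((pvCnt c).2.1 - 1) (-1)).foldl (fun tbl w =>
          (PySem.List.pyRange D ((pvCnt c).2.2 - 1) (-1)).foldl (fun tbl d =>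
            pvSet3 tbl t w d
              (max (pvGet3 tbl t w d)
                (pvGet3 tbl (t - (pvCnt c).1) (w - (pvCnt c).2.1) (d - (pvCnt c).2.2) + 1)))
            tbl) tbl) tb := by
    intro tb c
    unfold pvTri
    rw [pv_foldl_flatMap]
    simp only [pv_foldl_flatMap, List.foldl_map]
    rfl
  have hmain' : pvGet3 (crates.foldl (fun tb c =>
      (pvTri T W D (pvCnt c).1 (pvCnt c).2.1 (pvCnt c).2.2).foldl (pvUpd (pvCnt c)) tb)
      ((PySem.List.pyRange 0 (T + 1) 1).map fun _ =>
        (PySem.List.pyRange 0 (W + 1) 1).map fun _ =>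
          PySem.List.pyRepeat [(0 : Int)] (D + 1))) T W D =
      (crates.foldl (fun g c => pvStepF (pvCnt c) g) fun _ => 0) (T, W, D) := by
    simpa using hmain
  simp only [cargo]
  rw [← funext (fun tb => funext (fun c => hfun tb c)), hmain']
  unfold pvModel
  rw [List.foldl_map]

-- ---------- B side: the sparse dictionary ----------
def pvInCaps (T W D : Int) (x : Int × Int × Int) : Bool :=
  decide (x.1 ≤ T) && decide (x.2.1 ≤ W) && decide (x.2.2 ≤ D)

def pvBupd (T W D tc wc dc : Int) (b : PySem.Dict (Int × Int × Int) Int)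
    (kv : (Int × Int × Int) × Int) : PySem.Dict (Int × Int × Int) Int :=
  let nt := kv.1.1 + tc
  let nw := kv.1.2.1 + wc
  let nd := kv.1.2.2 + dc
  if nt ≤ T ∧ nw ≤ W ∧ nd ≤ D then
    if b.getD (nt, nw, nd) (-1) < kv.2 + 1 then b.insert (nt, nw, nd) (kv.2 + 1) else b
  else b

def pvNewget (T W D : Int) (q : Int × Int × Int) (b : PySem.Dict (Int × Int × Int) Int)
    (x : Int × Int × Int) : Option Int :=
  match b.get? (pvSub x q) with
  | some n => if pvInCaps T W D x then some (max (b.getD x (-1)) (n + 1)) else b.get? x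
  | none => b.get? x

def pvIsMaxF (b : PySem.Dict (Int × Int × Int) Int) (p : Int × Int × Int) (M : Int) : Prop :=
  0 ≤ M ∧ (∃ k v, b.get? k = some v ∧ pvLe3 k p = true ∧ v = M) ∧
    (∀ k v, b.get? k = some v → pvLe3 k p = true → v ≤ M)

def pvInvB (T W D : Int) (b : PySem.Dict (Int × Int × Int) Int)
    (g : Int × Int × Int → Int) : Prop :=
  b.keys.Nodup ∧ (∃ v0, b.get? (0, 0, 0) = some v0) ∧
    (∀ x v, b.get? x = some v → pvGrid T W D x ∧ 0 ≤ v) ∧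
    (∀ p, pvGrid T W D p → pvIsMaxF b p (g p))

lemma pvPassB_aux (T W D : Int) (q : Int × Int × Int)
    (b : PySem.Dict (Int × Int × Int) Int) :
    ∀ (suf : List ((Int × Int × Int) × Int)) (acc : PySem.Dict (Int × Int × Int) Int),
      (∀ kv ∈ suf, b.get? kv.1 = some kv.2) →
      (suf.map Prod.fst).Nodup →
      (∀ kv ∈ suf, 0 ≤ kv.2) →
      acc.keys.Nodup →
      (∀ x, (pvSub x q ∈ suf.map Prod.fst → acc.get? x = b.get? x) ∧
            (pvSub x q ∉ suf.map Prod.fst → acc.get? x = pvNewget T W D q b x)) →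
      (suf.foldl (pvBupd T W D q.1 q.2.1 q.2.2) acc).keys.Nodup ∧
      ∀ x, (suf.foldl (pvBupd T W D q.1 q.2.1 q.2.2) acc).get? x = pvNewget T W D q b x := by
  intro suf
  induction suf with
  | nil =>
    intro acc _ _ _ h4 h5
    exact ⟨h4, fun x => (h5 x).2 (by simp)⟩
  | cons kv suf ih =>
    intro acc h1 h2 h3 h4 h5
    rw [List.foldl_cons]
    simp only [List.map_cons, List.nodup_cons] at h2
    obtain ⟨hknotin, h2'⟩ := h2
    have hbkv : b.get? kv.1 = some kv.2 := h1 kv (by simp)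
    have hkv2 : 0 ≤ kv.2 := h3 kv (by simp)
    have hsubx0 : pvSub (kv.1.1 + q.1, kv.1.2.1 + q.2.1, kv.1.2.2 + q.2.2) q = kv.1 := by
      simp [pvSub]
    have hsub_iff : ∀ x : Int × Int × Int,
        pvSub x q = kv.1 ↔ x = (kv.1.1 + q.1, kv.1.2.1 + q.2.1, kv.1.2.2 + q.2.2) := by
      intro x
      simp only [pvSub, Prod.ext_iff]
      constructor <;> (intro h; refine ⟨by omega, by omega, by omega⟩)
    have hacc0 : acc.get? (kv.1.1 + q.1, kv.1.2.1 + q.2.1, kv.1.2.2 + q.2.2) =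
        b.get? (kv.1.1 + q.1, kv.1.2.1 + q.2.1, kv.1.2.2 + q.2.2) :=
      (h5 _).1 (by rw [hsubx0]; simp)
    have hstep : pvBupd T W D q.1 q.2.1 q.2.2 acc kv =
        if kv.1.1 + q.1 ≤ T ∧ kv.1.2.1 + q.2.1 ≤ W ∧ kv.1.2.2 + q.2.2 ≤ D then
          if acc.getD (kv.1.1 + q.1, kv.1.2.1 + q.2.1, kv.1.2.2 + q.2.2) (-1) < kv.2 + 1 then
            acc.insert (kv.1.1 + q.1, kv.1.2.1 + q.2.1, kv.1.2.2 + q.2.2) (kv.2 + 1)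
          else acc
        else acc := rfl
    apply ih _ (fun kv' h => h1 kv' (by simp [h])) h2' (fun kv' h => h3 kv' (by simp [h]))
    · rw [hstep]
      split_ifs with hc hlt
      · exact PySem.Dict.nodup_keys_insert _ _ _ h4
      · exact h4
      · exact h4
    · intro x
      have hgd : acc.getD (kv.1.1 + q.1, kv.1.2.1 + q.2.1, kv.1.2.2 + q.2.2) (-1) =
          b.getD (kv.1.1 + q.1, kv.1.2.1 + q.2.1, kv.1.2.2 + q.2.2) (-1) := by
        rw [PySem.Dict.getD_eq_get?_getD, PySem.Dict.getD_eq_get?_getD, hacc0]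
      constructor
      · intro hin
        have hxne : x ≠ (kv.1.1 + q.1, kv.1.2.1 + q.2.1, kv.1.2.2 + q.2.2) := by
          intro he
          rw [(hsub_iff x).mpr he] at hin
          exact hknotin hin
        have hsame : (pvBupd T W D q.1 q.2.1 q.2.2 acc kv).get? x = acc.get? x := by
          rw [hstep]
          split_ifs
          · rw [PySem.Dict.get?_insert]; simp [hxne]
          · rfl
          · rfl
        rw [hsame]
        exact (h5 x).1 (by simp [hin])
      · intro hnin
        by_cases hx : x = (kv.1.1 + q.1, kv.1.2.1 + q.2.1, kv.1.2.2 + q.2.2)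
        · subst hx
          have hng : pvNewget T W D q b (kv.1.1 + q.1, kv.1.2.1 + q.2.1, kv.1.2.2 + q.2.2) =
              if pvInCaps T W D (kv.1.1 + q.1, kv.1.2.1 + q.2.1, kv.1.2.2 + q.2.2) then
                some (max (b.getD (kv.1.1 + q.1, kv.1.2.1 + q.2.1, kv.1.2.2 + q.2.2) (-1)) (kv.2 + 1))
              else b.get? (kv.1.1 + q.1, kv.1.2.1 + q.2.1, kv.1.2.2 + q.2.2) := by
            unfold pvNewget
            rw [hsubx0, hbkv]
          rw [hstep]
          by_cases hc : kv.1.1 + q.1 ≤ T ∧ kv.1.2.1 + q.2.1 ≤ W ∧ kv.1.2.2 + q.2.2 ≤ D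
          · have hcap : pvInCaps T W D (kv.1.1 + q.1, kv.1.2.1 + q.2.1, kv.1.2.2 + q.2.2) = true := by
              simp only [pvInCaps, Bool.and_eq_true, decide_eq_true_eq]
              exact ⟨⟨hc.1, hc.2.1⟩, hc.2.2⟩
            rw [if_pos hc, hng, if_pos hcap]
            by_cases hlt : acc.getD (kv.1.1 + q.1, kv.1.2.1 + q.2.1, kv.1.2.2 + q.2.2) (-1) < kv.2 + 1
            · rw [if_pos hlt, PySem.Dict.get?_insert]
              rw [if_pos rfl]
              rw [hgd] at hlt
              congr 1
              omega
            · rw [if_neg hlt, hacc0]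
              rw [hgd] at hlt
              push Not at hlt
              cases hbx : b.get? (kv.1.1 + q.1, kv.1.2.1 + q.2.1, kv.1.2.2 + q.2.2) with
              | none =>
                exfalso
                rw [PySem.Dict.getD_eq_get?_getD, hbx] at hlt
                simp at hlt
                omega
              | some u =>
                rw [PySem.Dict.getD_eq_get?_getD, hbx] at hlt ⊢
                simp only [Option.getD_some] at hlt ⊢
                congr 1
                omega
          · have hcap : ¬ (pvInCaps T W D (kv.1.1 + q.1, kv.1.2.1 + q.2.1, kv.1.2.2 + q.2.2) = true) := by
              simp only [pvInCaps, Bool.and_eq_true, decide_eq_true_eq]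
              tauto
            rw [if_neg hc, hacc0, hng, if_neg hcap]
        · have hsame : (pvBupd T W D q.1 q.2.1 q.2.2 acc kv).get? x = acc.get? x := by
            rw [hstep]
            split_ifs
            · rw [PySem.Dict.get?_insert]; simp [hx]
            · rfl
            · rfl
          rw [hsame]
          apply (h5 x).2
          simp only [List.map_cons, List.mem_cons]
          push Not
          exact ⟨fun he => hx ((hsub_iff x).mp he), hnin⟩

lemma pvPassB (T W D : Int) (q : Int × Int × Int) (b : PySem.Dict (Int × Int × Int) Int)
    (hnd : b.keys.Nodup) (hvals : ∀ x v, b.get? x = some v → 0 ≤ v) :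
    (b.items.foldl (pvBupd T W D q.1 q.2.1 q.2.2) b).keys.Nodup ∧
    ∀ x, (b.items.foldl (pvBupd T W D q.1 q.2.1 q.2.2) b).get? x = pvNewget T W D q b x := by
  apply pvPassB_aux T W D q b b.items b
  · intro kv h
    exact PySem.Dict.get?_of_mem_items _ h hnd
  · exact hnd
  · intro kv h
    exact hvals _ _ (PySem.Dict.get?_of_mem_items _ h hnd)
  · exact hnd
  · intro x
    refine ⟨fun _ => rfl, fun hnin => ?_⟩
    unfold pvNewget
    have hnone : b.get? (pvSub x q) = none := by
      rw [PySem.Dict.get?_eq_none_iff_not_mem_keys]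
      exact hnin
    rw [hnone]

lemma pvInvB_step (T W D : Int) (q : Int × Int × Int) (hq : pvNN q)
    (b : PySem.Dict (Int × Int × Int) Int) (g : Int × Int × Int → Int)
    (hb : pvInvB T W D b g) (r : PySem.Dict (Int × Int × Int) Int)
    (hr : ∀ x, r.get? x = pvNewget T W D q b x) (hrn : r.keys.Nodup) :
    pvInvB T W D r (pvStepF q g) := by
  obtain ⟨hq1, hq2, hq3⟩ := hq
  obtain ⟨hnd, ⟨v0, h0⟩, hkv, hmax⟩ := hb
  have hchar : ∀ x v, r.get? x = some v →
      b.get? x = some v ∨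
      ∃ n, b.get? (pvSub x q) = some n ∧ pvInCaps T W D x = true ∧
        v = max (b.getD x (-1)) (n + 1) := by
    intro x v hx
    rw [hr x] at hx
    unfold pvNewget at hx
    cases hbs : b.get? (pvSub x q) with
    | none => rw [hbs] at hx; exact Or.inl hx
    | some n =>
      rw [hbs] at hx
      dsimp only at hx
      by_cases hcap : pvInCaps T W D x = true
      · rw [if_pos hcap] at hx
        injection hx with hv
        exact Or.inr ⟨n, rfl, hcap, hv.symm⟩
      · rw [if_neg hcap] at hx; exact Or.inl hx
  refine ⟨hrn, ?_, ?_, ?_⟩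
  · rw [hr]
    unfold pvNewget
    cases hbs : b.get? (pvSub ((0 : Int), (0 : Int), (0 : Int)) q) with
    | none => exact ⟨v0, h0⟩
    | some n =>
      dsimp only
      by_cases hcap : pvInCaps T W D ((0 : Int), (0 : Int), (0 : Int)) = true
      · rw [if_pos hcap]; exact ⟨_, rfl⟩
      · rw [if_neg hcap]; exact ⟨v0, h0⟩
  · intro x v hx
    rcases hchar x v hx with h | ⟨n, hn, hcap, hv⟩
    · exact hkv x v h
    · obtain ⟨⟨g1, g2, g3, g4, g5, g6⟩, hn0⟩ := hkv _ _ hn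
      simp only [pvSub] at g1 g3 g5
      simp only [pvInCaps, Bool.and_eq_true, decide_eq_true_eq] at hcap
      refine ⟨⟨by omega, hcap.1.1, by omega, hcap.1.2, by omega, hcap.2⟩, ?_⟩
      rw [hv]
      have h1 : (0 : Int) ≤ n + 1 := by omega
      exact le_trans h1 (le_max_right _ _)
  · intro p hp
    obtain ⟨h1, h2, h3, h4, h5, h6⟩ := hp
    obtain ⟨hMp0, ⟨kp, vp, hkp, hlep, hvp⟩, hbp⟩ := hmax p ⟨h1, h2, h3, h4, h5, h6⟩
    unfold pvStepF
    by_cases hle : pvLe3 q p = true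
    · rw [if_pos hle]
      have hle3 : (q.1 ≤ p.1 ∧ q.2.1 ≤ p.2.1) ∧ q.2.2 ≤ p.2.2 := by simpa [pvLe3] using hle
      have hsgrid : pvGrid T W D (pvSub p q) := by
        simp only [pvSub, pvGrid]; omega
      obtain ⟨hMs0, ⟨ks, vs, hks, hles, hvs⟩, hbs⟩ := hmax (pvSub p q) hsgrid
      have hles' : ks.1 ≤ p.1 - q.1 ∧ ks.2.1 ≤ p.2.1 - q.2.1 ∧ ks.2.2 ≤ p.2.2 - q.2.2 := by
        have := hles
        simp only [pvLe3, pvSub, Bool.and_eq_true, decide_eq_true_eq] at this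
        exact ⟨this.1.1, this.1.2, this.2⟩
      refine ⟨le_trans hMp0 (le_max_left _ _), ?_, ?_⟩
      · by_cases hcase : g (pvSub p q) + 1 ≤ g p
        · rw [max_eq_left hcase]
          refine ⟨kp, g p, ?_, hlep, rfl⟩
          rw [hr kp]
          unfold pvNewget
          cases hbsk : b.get? (pvSub kp q) with
          | none => rw [hvp] at hkp; exact hkp
          | some n =>
            dsimp only
            by_cases hcapk : pvInCaps T W D kp = true
            · rw [if_pos hcapk]
              have hlep' : (kp.1 ≤ p.1 ∧ kp.2.1 ≤ p.2.1) ∧ kp.2.2 ≤ p.2.2 := by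
                simpa [pvLe3] using hlep
              have hlekq : pvLe3 (pvSub kp q) (pvSub p q) = true := by
                simp only [pvLe3, pvSub, Bool.and_eq_true, decide_eq_true_eq]
                refine ⟨⟨by omega, by omega⟩, by omega⟩
              have hnle : n ≤ g (pvSub p q) := hbs _ _ hbsk hlekq
              rw [PySem.Dict.getD_eq_get?_getD, hkp]
              simp only [Option.getD_some]
              congr 1
              rw [hvp]
              omega
            · rw [if_neg hcapk]; rw [hvp] at hkp; exact hkp
        · rw [max_eq_right (by omega)]
          refine ⟨(ks.1 + q.1, ks.2.1 + q.2.1, ks.2.2 + q.2.2), g (pvSub p q) + 1, ?_, ?_, rfl⟩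
          · rw [hr]
            unfold pvNewget
            have hsubx1 : pvSub (ks.1 + q.1, ks.2.1 + q.2.1, ks.2.2 + q.2.2) q = ks := by
              simp [pvSub]
            rw [hsubx1, hks]
            dsimp only
            have hcap1 : pvInCaps T W D (ks.1 + q.1, ks.2.1 + q.2.1, ks.2.2 + q.2.2) = true := by
              simp only [pvInCaps, Bool.and_eq_true, decide_eq_true_eq]
              refine ⟨⟨by omega, by omega⟩, by omega⟩
            rw [if_pos hcap1]
            congr 1
            have hvs0 : 0 ≤ vs := (hkv _ _ hks).2
            cases hbx1 : b.get? (ks.1 + q.1, ks.2.1 + q.2.1, ks.2.2 + q.2.2) with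
            | none =>
              rw [PySem.Dict.getD_eq_get?_getD, hbx1]
              simp only [Option.getD_none]
              rw [max_eq_right (by omega), hvs]
            | some u =>
              have hleu : pvLe3 (ks.1 + q.1, ks.2.1 + q.2.1, ks.2.2 + q.2.2) p = true := by
                simp only [pvLe3, Bool.and_eq_true, decide_eq_true_eq]
                refine ⟨⟨by omega, by omega⟩, by omega⟩
              have hup : u ≤ g p := hbp _ _ hbx1 hleu
              rw [PySem.Dict.getD_eq_get?_getD, hbx1]
              simp only [Option.getD_some]
              rw [hvs] at *
              rw [max_eq_right (by omega)]
          · simp only [pvLe3, Bool.and_eq_true, decide_eq_true_eq]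
            refine ⟨⟨by omega, by omega⟩, by omega⟩
      · intro k v hk hlekp
        rcases hchar k v hk with hcb | ⟨n, hn, hcapk, hveq⟩
        · exact le_trans (hbp _ _ hcb hlekp) (le_max_left _ _)
        · have hlek : (k.1 ≤ p.1 ∧ k.2.1 ≤ p.2.1) ∧ k.2.2 ≤ p.2.2 := by
            simpa [pvLe3] using hlekp
          have hnsub : pvLe3 (pvSub k q) (pvSub p q) = true := by
            simp only [pvLe3, pvSub, Bool.and_eq_true, decide_eq_true_eq]
            refine ⟨⟨by omega, by omega⟩, by omega⟩
          have hnle : n ≤ g (pvSub p q) := hbs _ _ hn hnsub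
          rw [hveq]
          apply max_le
          · cases hbk : b.get? k with
            | none =>
              rw [PySem.Dict.getD_eq_get?_getD, hbk]
              simp only [Option.getD_none]
              have : (-1 : Int) ≤ g p := by omega
              exact le_trans this (le_max_left _ _)
            | some u =>
              rw [PySem.Dict.getD_eq_get?_getD, hbk]
              simp only [Option.getD_some]
              exact le_trans (hbp _ _ hbk hlekp) (le_max_left _ _)
          · have : n + 1 ≤ g (pvSub p q) + 1 := by omega
            exact le_trans this (le_max_right _ _)
    · rw [if_neg hle]
      refine ⟨hMp0, ?_, ?_⟩
      · refine ⟨kp, g p, ?_, hlep, rfl⟩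
        rw [hr kp]
        unfold pvNewget
        cases hbsk : b.get? (pvSub kp q) with
        | none => rw [hvp] at hkp; exact hkp
        | some n =>
          exfalso
          apply hle
          obtain ⟨⟨s1, _, s3, _, s5, _⟩, _⟩ := hkv _ _ hbsk
          simp only [pvSub] at s1 s3 s5
          have hlep' : (kp.1 ≤ p.1 ∧ kp.2.1 ≤ p.2.1) ∧ kp.2.2 ≤ p.2.2 := by
            simpa [pvLe3] using hlep
          simp only [pvLe3, Bool.and_eq_true, decide_eq_true_eq]
          refine ⟨⟨by omega, by omega⟩, by omega⟩
      · intro k v hk hlekp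
        rcases hchar k v hk with hcb | ⟨n, hn, hcapk, hveq⟩
        · exact hbp _ _ hcb hlekp
        · exfalso
          apply hle
          obtain ⟨⟨s1, _, s3, _, s5, _⟩, _⟩ := hkv _ _ hn
          simp only [pvSub] at s1 s3 s5
          have hlek : (k.1 ≤ p.1 ∧ k.2.1 ≤ p.2.1) ∧ k.2.2 ≤ p.2.2 := by
            simpa [pvLe3] using hlekp
          simp only [pvLe3, Bool.and_eq_true, decide_eq_true_eq]
          refine ⟨⟨by omega, by omega⟩, by omega⟩

lemma pvInvB_init (T W D : Int) (hT : 0 ≤ T) (hW : 0 ≤ W) (hD : 0 ≤ D) :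
    pvInvB T W D (PySem.Dict.ofList [(((0 : Int), (0 : Int), (0 : Int)), (0 : Int))])
      (fun _ => 0) := by
  have hget : ∀ x : Int × Int × Int,
      (PySem.Dict.ofList [(((0 : Int), (0 : Int), (0 : Int)), (0 : Int))]).get? x =
        if x = ((0 : Int), (0 : Int), (0 : Int)) then some 0 else none := by
    intro x
    have hd : PySem.Dict.ofList [(((0 : Int), (0 : Int), (0 : Int)), (0 : Int))] =
        PySem.Dict.mk [(((0 : Int), (0 : Int), (0 : Int)), (0 : Int))] := by rfl
    rw [hd, PySem.Dict.get?_mk_cons]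
    by_cases h : x = ((0 : Int), (0 : Int), (0 : Int))
    · subst h; simp
    · rw [if_neg h]
      have hne : ¬ ((((0 : Int), (0 : Int), (0 : Int)) : Int × Int × Int) == x) = true := by
        simp only [beq_iff_eq]
        exact fun he => h he.symm
      rw [if_neg hne]
      rfl
  refine ⟨PySem.Dict.nodup_keys_ofList _, ⟨0, by rw [hget]; simp⟩, ?_, ?_⟩
  · intro x v hx
    rw [hget] at hx
    by_cases h : x = ((0 : Int), (0 : Int), (0 : Int))
    · rw [if_pos h] at hx
      injection hx with hv
      subst h
      exact ⟨⟨le_refl 0, hT, le_refl 0, hW, le_refl 0, hD⟩, by omega⟩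
    · rw [if_neg h] at hx; cases hx
  · intro p hp
    obtain ⟨h1, h2, h3, h4, h5, h6⟩ := hp
    refine ⟨le_refl 0, ⟨((0 : Int), (0 : Int), (0 : Int)), 0, by rw [hget]; simp, ?_, rfl⟩, ?_⟩
    · simp only [pvLe3, Bool.and_eq_true, decide_eq_true_eq]
      exact ⟨⟨h1, h3⟩, h5⟩
    · intro k v hk _
      rw [hget] at hk
      by_cases h : k = ((0 : Int), (0 : Int), (0 : Int))
      · rw [if_pos h] at hk; injection hk with hv; exact le_of_eq hv.symm
      · rw [if_neg h] at hk; cases hk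

lemma pvFoldB (T W D : Int) :
    ∀ (cs : List String) (b : PySem.Dict (Int × Int × Int) Int) (g : Int × Int × Int → Int),
      pvInvB T W D b g →
      pvInvB T W D
        (cs.foldl (fun b c => b.items.foldl (pvBupd T W D (pvCnt c).1 (pvCnt c).2.1 (pvCnt c).2.2) b) b)
        (cs.foldl (fun g c => pvStepF (pvCnt c) g) g) := by
  intro cs
  induction cs with
  | nil => intro b g hb; exact hb
  | cons c cs ih =>
    intro b g hb
    have hpass := pvPassB T W D (pvCnt c) b hb.1 (fun x v h => (hb.2.2.1 x v h).2)
    exact ih _ _ (pvInvB_step T W D (pvCnt c) (pvCnt_nn c) b g hb _ hpass.2 hpass.1)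

lemma pvExtract (T W D : Int) (b : PySem.Dict (Int × Int × Int) Int)
    (g : Int × Int × Int → Int) (hb : pvInvB T W D b g)
    (hT : 0 ≤ T) (hW : 0 ≤ W) (hD : 0 ≤ D) :
    ((PySem.List.max? b.values (fun v => v)).getD 0) = g (T, W, D) := by
  obtain ⟨hnd, ⟨v0, h0⟩, hkv, hmax⟩ := hb
  have hM := hmax (T, W, D) ⟨hT, le_refl T, hW, le_refl W, hD, le_refl D⟩
  obtain ⟨hM0, ⟨k0, u0, hk0, hle0, hu0⟩, hbound⟩ := hM
  have hub : ∀ u ∈ b.values, u ≤ g (T, W, D) := by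
    intro u hu
    rcases List.mem_map.mp hu with ⟨kv, hkvmem, rfl⟩
    have hget := PySem.Dict.get?_of_mem_items _ hkvmem hnd
    apply hbound _ _ hget
    obtain ⟨⟨g1, g2, g3, g4, g5, g6⟩, _⟩ := hkv _ _ hget
    simp only [pvLe3, Bool.and_eq_true, decide_eq_true_eq]
    exact ⟨⟨g2, g4⟩, g6⟩
  have hmemk0 : (k0, u0) ∈ b.items := PySem.Dict.mem_items_of_get?_eq_some b hk0
  have hvin : g (T, W, D) ∈ b.values := by
    rw [← hu0]
    exact List.mem_map_of_mem hmemk0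
  cases hv : b.values with
  | nil => rw [hv] at hvin; cases hvin
  | cons v rest =>
    rw [PySem.List.max?_id_cons]
    simp only [Option.getD_some]
    rw [hv] at hvin
    have hub' : ∀ u ∈ v :: rest, u ≤ g (T, W, D) := by rw [← hv]; exact hub
    apply le_antisymm
    · rcases PySem.List.foldl_max_mem rest v with h | h
      · rw [h]; exact hub' v (by simp)
      · exact hub' _ (by simp [h])
    · rcases List.mem_cons.mp hvin with h | h
      · rw [h]; exact (PySem.List.le_foldl_max rest v).1
      · exact (PySem.List.le_foldl_max rest v).2 _ h

lemma pvCargoB (crates : List String) (T W D : Int) (hT : 0 ≤ T) (hW : 0 ≤ W) (hD : 0 ≤ D) :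
    cargo_alt crates T W D = pvModel (crates.map pvCnt) (T, W, D) := by
  have hinv := pvFoldB T W D crates _ _ (pvInvB_init T W D hT hW hD)
  have hext := pvExtract T W D _ _ hinv hT hW hD
  have hport : cargo_alt crates T W D =
      (PySem.List.max?
        ((crates.foldl (fun b c =>
          b.items.foldl (pvBupd T W D (pvCnt c).1 (pvCnt c).2.1 (pvCnt c).2.2) b)
          (PySem.Dict.ofList [(((0 : Int), (0 : Int), (0 : Int)), (0 : Int))])).values)
        (fun v => v)).getD 0 := rfl
  rw [hport, hext]
  unfold pvModel
  rw [List.foldl_map]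

-- ===== VERDICT (by name: the statement is the Claim_ definition above) =====
theorem cargo_spec : Claim_equal_cargo := by
  intro crates T W D _ hpre
  unfold Spec_cargo
  obtain ⟨hT, hW, hD⟩ := hpre
  rw [pvCargoA crates T W D hT hW hD, pvCargoB crates T W D hT hW hD]
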